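-- pv_equiv track=rewrite | github.com/pintxo1/corpus-etnografico-galicia | 02_methods/scripts_core/emigrant_profile_composition_analysis.py | map_label_to_family
-- ===== SOURCE A (Python) =====
-- def map_label_to_family(marker_label: str, families: dict) -> str:
--     """Mapea un marker_label a su familia semántica."""
--     marker_label_lower = str(marker_label).lower()
--
--     # Búsqueda greedy: buscar keywords en label
--     best_match = None
--     best_score = 0
--
--     for family_id, family_info in families.items():
--         keywords = family_info.get('keywords', [])
--         for keyword in keywords:
--             if keyword.lower() in marker_label_lower:
--                 # Priorizar matches más específicos (keywords más largos)
--                 if len(keyword) > best_score: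
--                     best_match = family_id
--                     best_score = len(keyword)
--
--     return best_match if best_match else 'other'
-- ===== SOURCE B (Python) =====
-- def map_label_to_family(marker_label: str, families: dict) -> str:
--     """Collect-sort-scan: gather all non-empty (family, keyword) pairs, sort them
--     stably by descending keyword length, return the first whose keyword occurs in
--     the label."""
--     candidates = []
--     for family_id, family_info in families.items():
--         for keyword in family_info.get('keywords', []):
--             if len(keyword) > 0:
--                 candidates.append((family_id, keyword))
--     candidates.sort(key=lambda c: -len(c[1]))
--     label_lower = str(marker_label).lower()
--     for family_id, keyword in candidates:
--         if keyword.lower() in label_lower: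
--             return family_id
--     return 'other'
-- ===== Notes on version B (the rewrite author's own statement) =====
-- stated objective: alternative
-- what changed: Replaces A's single-pass running-maximum (best_match/best_score state) by collecting all non-empty (family, keyword) candidate pairs, stably sorting them by descending keyword length, and returning the first sorted candidate whose lowered keyword occurs in the lowered label.
-- outside the precondition, e.g. on map_label_to_family('abc', {'': {'keywords': ['abc']}}): A returns 'other', B returns ''
import Mathlib
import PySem

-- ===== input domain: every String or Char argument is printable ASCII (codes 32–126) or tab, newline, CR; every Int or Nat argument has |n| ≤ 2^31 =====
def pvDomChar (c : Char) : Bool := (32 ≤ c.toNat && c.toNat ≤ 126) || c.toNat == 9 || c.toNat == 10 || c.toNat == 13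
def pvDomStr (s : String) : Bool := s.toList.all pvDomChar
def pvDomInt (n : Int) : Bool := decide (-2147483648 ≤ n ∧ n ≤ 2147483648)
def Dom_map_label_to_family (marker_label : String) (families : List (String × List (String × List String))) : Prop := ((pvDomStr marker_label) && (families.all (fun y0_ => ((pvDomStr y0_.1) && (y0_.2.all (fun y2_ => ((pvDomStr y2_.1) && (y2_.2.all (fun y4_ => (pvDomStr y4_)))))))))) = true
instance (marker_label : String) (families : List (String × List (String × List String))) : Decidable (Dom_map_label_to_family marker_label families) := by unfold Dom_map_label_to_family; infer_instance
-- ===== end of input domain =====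

-- B replaces A's running-maximum scan by collect / stable sort by descending keyword length / first match (alternative algorithm, same asymptotic cost).


-- ===== PORT A =====
-- the tester passes `families` to Python as a dict (and each family_info as a dict):
-- both ports model that conversion with PySem.Dict.ofList before iterating.
def map_label_to_family (marker_label : String) (families : List (String × List (String × List String))) : String :=
  let marker_label_lower := PySem.Str.lower marker_label
  let res := (PySem.Dict.ofList families).items.foldl
    (fun (st : Option String × Int) fam =>
      let keywords := (PySem.Dict.ofList fam.2).getD "keywords" []
      keywords.foldl
        (fun (st : Option String × Int) kw =>
          if PySem.Str.isIn (PySem.Str.lower kw) marker_label_lower then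
            if PySem.Str.len kw > st.2 then (some fam.1, PySem.Str.len kw) else st
          else st) st)
    (none, 0)
  match res.1 with
  | some bm => if bm = "" then "other" else bm   -- Python truthiness: `best_match if best_match else 'other'`
  | none => "other"

-- ===== PORT B =====
def map_label_to_family_alt (marker_label : String) (families : List (String × List (String × List String))) : String :=
  let candidates := (PySem.Dict.ofList families).items.foldl
    (fun (acc : List (String × String)) fam =>
      ((PySem.Dict.ofList fam.2).getD "keywords" []).foldl
        (fun acc kw => if PySem.Str.len kw > 0 then acc ++ [(fam.1, kw)] else acc) acc)
    []
  let sortedCands := PySem.List.sorted candidates (fun c => -(PySem.Str.len c.2)) false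
  let label_lower := PySem.Str.lower marker_label
  match sortedCands.find? (fun c => PySem.Str.isIn (PySem.Str.lower c.2) label_lower) with
  | some c => c.1
  | none => "other"

-- ===== PRECONDITION & SPEC =====
-- Pre_ excludes families keyed by the empty string: there A's falsy check (`best_match if best_match`)
-- and B's found id are two equally defensible answers for a meaningless category name.
def Pre_map_label_to_family (marker_label : String) (families : List (String × List (String × List String))) : Prop :=
  ∀ fam ∈ families, fam.1 ≠ ""
instance (marker_label : String) (families : List (String × List (String × List String))) : Decidable (Pre_map_label_to_family marker_label families) := by unfold Pre_map_label_to_family; infer_instance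
def pvWitness_map_label_to_family : String × (List (String × List (String × List String))) :=
  ("Cultivo de trigo e millo", [("cereal", [("keywords", ["trigo", "millo"])]), ("mar", [("keywords", ["peixe"])])])
def Spec_map_label_to_family (marker_label : String) (families : List (String × List (String × List String))) (out : String) : Prop := out = map_label_to_family_alt marker_label families
instance (marker_label : String) (families : List (String × List (String × List String))) (out : String) : Decidable (Spec_map_label_to_family marker_label families out) := by unfold Spec_map_label_to_family; infer_instance

-- ===== CLAIM (what is proved, stated in full; the proofs are below) =====
def Claim_equal_map_label_to_family : Prop := ∀ (marker_label : String) (families : List (String × List (String × List String))), Dom_map_label_to_family marker_label families → Pre_map_label_to_family marker_label families → Spec_map_label_to_family marker_label families (map_label_to_family marker_label families)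

-- ===== LEMMAS AND PROOFS =====


def pvStep (ll : String) (st : Option String × Int) (c : String × String) : Option String × Int :=
  if PySem.Str.isIn (PySem.Str.lower c.2) ll then
    if PySem.Str.len c.2 > st.2 then (some c.1, PySem.Str.len c.2) else st
  else st

def pvP (ll : String) (c : String × String) : Bool := PySem.Str.isIn (PySem.Str.lower c.2) ll
def pvKey (c : String × String) : Int := -(PySem.Str.len c.2)
def pvPairs (items : List (String × List (String × List String))) : List (String × String) :=
  items.flatMap (fun fam => ((PySem.Dict.ofList fam.2).getD "keywords" []).map (fun kw => (fam.1, kw)))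

theorem pv_len_nonneg (s : String) : 0 ≤ PySem.Str.len s := by
  simp [PySem.Str.len_eq]

theorem pv_A_flatten (ll : String) (items : List (String × List (String × List String)))
    (st : Option String × Int) :
    items.foldl
      (fun st fam =>
        ((PySem.Dict.ofList fam.2).getD "keywords" []).foldl
          (fun (st : Option String × Int) kw =>
            if PySem.Str.isIn (PySem.Str.lower kw) ll then
              if PySem.Str.len kw > st.2 then (some fam.1, PySem.Str.len kw) else st
            else st) st) st
      = (pvPairs items).foldl (pvStep ll) st := by
  induction items generalizing st with
  | nil => simp [pvPairs]
  | cons fam items ih =>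
    have hlam : (fun (st : Option String × Int) kw =>
        if PySem.Str.isIn (PySem.Str.lower kw) ll then
          if PySem.Str.len kw > st.2 then (some fam.1, PySem.Str.len kw) else st
        else st) = fun st kw => pvStep ll st (fam.1, kw) := rfl
    simp only [List.foldl_cons, pvPairs, List.flatMap_cons, List.foldl_append, List.foldl_map, hlam]
    exact ih _

theorem pv_B_flatten (items : List (String × List (String × List String)))
    (acc : List (String × String)) :
    items.foldl
      (fun (acc : List (String × String)) fam =>
        ((PySem.Dict.ofList fam.2).getD "keywords" []).foldl
          (fun acc kw => if PySem.Str.len kw > 0 then acc ++ [(fam.1, kw)] else acc) acc) acc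
      = acc ++ (pvPairs items).filter (fun c => decide (0 < PySem.Str.len c.2)) := by
  induction items generalizing acc with
  | nil => simp [pvPairs]
  | cons fam items ih =>
    simp only [List.foldl_cons, pvPairs, List.flatMap_cons, List.filter_append, ih]
    have hlam : (fun (acc : List (String × String)) kw =>
        if PySem.Str.len kw > 0 then acc ++ [(fam.1, kw)] else acc)
        = fun acc kw => if (fun kw => decide (PySem.Str.len kw > 0)) kw = true then acc ++ [(fun kw => (fam.1, kw)) kw] else acc := by
      funext acc kw; simp
    rw [hlam, PySem.List.foldl_append_if]
    simp [List.filter_map, Function.comp_def, List.append_assoc]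

theorem pv_filter_noop (ll : String) (cs : List (String × String)) (st : Option String × Int)
    (h : 0 ≤ st.2) :
    cs.foldl (pvStep ll) st = (cs.filter (fun c => decide (0 < PySem.Str.len c.2))).foldl (pvStep ll) st := by
  induction cs generalizing st with
  | nil => rfl
  | cons c cs ih =>
    by_cases hc : 0 < PySem.Str.len c.2
    · have hst : 0 ≤ (pvStep ll st c).2 := by
        unfold pvStep
        split_ifs
        · exact pv_len_nonneg _
        · exact h
        · exact h
      simp only [List.filter_cons, hc, decide_true, List.foldl_cons]
      exact ih _ hst
    · have hstep : pvStep ll st c = st := by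
        unfold pvStep; split_ifs with h1 h2
        · omega
        · rfl
        · rfl
      simp only [List.filter_cons, hc, decide_false, List.foldl_cons, hstep]
      exact ih _ h

theorem pv_find_insertBy {α : Type} (q : α → Bool) (key : α → Int) (x : α) (ys : List α)
    (hp : ys.Pairwise (fun a b => key a ≤ key b)) :
    (PySem.List.insertBy (fun a b => decide (key a < key b)) x ys).find? q =
      match ys.find? q with
      | none => if q x then some x else none
      | some c => if q x && decide (key x < key c) then some x else some c := by
  induction ys with
  | nil => simp [PySem.List.insertBy]
  | cons y ys ih =>
    rw [List.pairwise_cons] at hp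
    obtain ⟨hy, hp'⟩ := hp
    simp only [PySem.List.insertBy]
    by_cases hxy : key x < key y
    · simp only [hxy, decide_true, if_pos]
      cases hqx : q x with
      | false =>
        cases hfind : List.find? q (y :: ys) <;>
          simp [hqx, hfind]
      | true =>
        cases hfind : List.find? q (y :: ys) with
        | none => simp [hqx]
        | some c =>
          have hcm := List.mem_of_find?_eq_some hfind
          have hkc : key x < key c := by
            rcases List.mem_cons.mp hcm with h | h
            · rw [h]; exact hxy
            · exact lt_of_lt_of_le hxy (hy c h)
          simp [hqx, hkc]
    · simp only [hxy, decide_false, if_neg, Bool.false_eq_true, not_false_eq_true]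
      cases hqy : q y with
      | true =>
        have : List.find? q (y :: ys) = some y := by simp [hqy]
        simp [hqy, this, hxy]
      | false =>
        rw [List.find?_cons_of_neg (p := q) (l := ys) (by simp [hqy]),
          List.find?_cons_of_neg (p := q) (l := PySem.List.insertBy (fun a b => decide (key a < key b)) x ys) (by simp [hqy]),
          ih hp']

theorem pvStep_eval (ll : String) (st : Option String × Int) (c : String × String) :
    pvStep ll st c = if pvP ll c then (if PySem.Str.len c.2 > st.2 then (some c.1, PySem.Str.len c.2) else st) else st := rfl

theorem pv_main (ll : String) (cs : List (String × String))
    (hpos : ∀ c ∈ cs, 0 < PySem.Str.len c.2) :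
    cs.foldl (pvStep ll) (none, 0) =
      match (PySem.List.sorted cs pvKey false).find? (pvP ll) with
      | none => ((none : Option String), (0 : Int))
      | some c => (some c.1, PySem.Str.len c.2) := by
  induction cs using List.reverseRecOn with
  | nil => rfl
  | append_singleton cs x ih =>
    have hsorted : PySem.List.sorted (cs ++ [x]) pvKey false
        = PySem.List.insertBy (fun a b => decide (pvKey a < pvKey b)) x
            (PySem.List.sorted cs pvKey false) := by
      rw [PySem.List.sorted_eq_foldl_insertBy, PySem.List.sorted_eq_foldl_insertBy,
        List.foldl_append]
      rfl
    have hposx : 0 < PySem.Str.len x.2 := hpos x (by simp)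
    rw [List.foldl_append, ih (fun c hc => hpos c (by simp [hc])), hsorted,
      pv_find_insertBy (pvP ll) pvKey x _ (PySem.List.sorted_pairwise cs pvKey)]
    cases hfind : (PySem.List.sorted cs pvKey false).find? (pvP ll) with
    | none =>
      cases hq : pvP ll x with
      | false => simp [List.foldl_cons, List.foldl_nil, pvStep_eval, hq]
      | true =>
        rw [PySem.Str.len_eq] at hposx
        simp [List.foldl_cons, List.foldl_nil, pvStep_eval, hq]
        intro h
        rw [h] at hposx
        simp at hposx
    | some c =>
      cases hq : pvP ll x with
      | false => simp [List.foldl_cons, List.foldl_nil, pvStep_eval, hq]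
      | true =>
        by_cases hlt : PySem.Str.len c.2 < PySem.Str.len x.2
        · have hk : decide (pvKey x < pvKey c) = true := by
            simp only [pvKey, decide_eq_true_eq]; omega
          simp [PySem.Str.len_eq] at hlt
          simp [List.foldl_cons, List.foldl_nil, pvStep_eval, hq, hk, gt_iff_lt, hlt]
        · have hk : decide (pvKey x < pvKey c) = false := by
            simp only [pvKey, decide_eq_false_iff_not]; omega
          simp [PySem.Str.len_eq] at hlt
          simp [List.foldl_cons, List.foldl_nil, pvStep_eval, hq, hk, gt_iff_lt, hlt]

theorem pv_fst_mem (items : List (String × List (String × List String))) (c : String × String)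
    (hc : c ∈ pvPairs items) : ∃ fam ∈ items, c.1 = fam.1 := by
  simp only [pvPairs, List.mem_flatMap, List.mem_map] at hc
  obtain ⟨fam, hfam, kw, _, hco⟩ := hc
  exact ⟨fam, hfam, by rw [← hco]⟩

theorem pv_keys_sub (families : List (String × List (String × List String))) (k : String)
    (hk : k ∈ (PySem.Dict.ofList families).keys) : k ∈ families.map Prod.fst := by
  have h := PySem.Dict.keys_foldl_insert_key (ν := List (String × List String))
    families Prod.fst (fun _ x => x.2) PySem.Dict.empty
  have hof : (PySem.Dict.ofList families).keys
      = PySem.Set.update PySem.Dict.empty.keys (families.map Prod.fst) := h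
  rw [hof] at hk
  rcases (PySem.Set.mem_update _ _ _).mp hk with h' | h'
  · simp [PySem.Dict.keys_empty] at h'
  · exact h'

-- ===== VERDICT (by name: the statement is the Claim_ definition above) =====
theorem map_label_to_family_spec : Claim_equal_map_label_to_family := by
  intro ml fams _ hpre
  unfold Spec_map_label_to_family map_label_to_family map_label_to_family_alt
  simp only [pv_A_flatten, pv_B_flatten, List.nil_append]
  rw [pv_filter_noop (PySem.Str.lower ml) (pvPairs (PySem.Dict.ofList fams).items) (none, 0)
    (by norm_num)]
  have hposf : ∀ c ∈ (pvPairs (PySem.Dict.ofList fams).items).filter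
      (fun c => decide (0 < PySem.Str.len c.2)), 0 < PySem.Str.len c.2 := by
    intro c hc
    exact of_decide_eq_true (List.mem_filter.mp hc).2
  rw [pv_main (PySem.Str.lower ml) _ hposf,
    show (fun c : String × String => -(PySem.Str.len c.2)) = pvKey from rfl,
    show (fun c : String × String => PySem.Str.isIn (PySem.Str.lower c.2) (PySem.Str.lower ml))
      = pvP (PySem.Str.lower ml) from rfl]
  cases hfind : (PySem.List.sorted ((pvPairs (PySem.Dict.ofList fams).items).filter
      (fun c => decide (0 < PySem.Str.len c.2))) pvKey false).find? (pvP (PySem.Str.lower ml)) with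
  | none => rfl
  | some c =>
    have hmem : c ∈ pvPairs (PySem.Dict.ofList fams).items := by
      have h1 := List.mem_of_find?_eq_some hfind
      have h2 := (PySem.List.mem_sorted _ _ _ _).mp h1
      exact (List.mem_filter.mp h2).1
    obtain ⟨fam, hfam, hc1⟩ := pv_fst_mem _ _ hmem
    have hkey : fam.1 ∈ (PySem.Dict.ofList fams).keys :=
      PySem.Dict.mem_keys_of_mem_items _ hfam
    have hkey2 := pv_keys_sub fams fam.1 hkey
    obtain ⟨p, hp, hpe⟩ := List.mem_map.mp hkey2
    have hne : c.1 ≠ "" := by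
      rw [hc1, ← hpe]
      exact hpre p hp
    simp [hne]
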